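-- pv_equiv track=rewrite | github.com/TiyahSingh/GameJam9To5 | game/assets.py | _role_from_name
-- ===== SOURCE A (Python) =====
-- def _norm(s: str) -> str:
--     return s.lower().replace("-", "_").replace(" ", "_")
--
-- def _role_from_name(rel_parts: list[str], filename: str) -> str:
--     joined = "_".join(_norm(p) for p in rel_parts + [filename])
--
--     # Characters — order matters: more specific patterns first
--     if "character_1" in joined or "char_a" in joined or "worker_a" in joined or "player_a" in joined or "a_sprite" in joined:
--         return "char_a"
--     if "character_2" in joined or "char_b" in joined or "worker_b" in joined or "player_b" in joined or "b_sprite" in joined: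
--         return "char_b"
--
--     # Tiles — "Obstacle *" images from each theme folder render as maze walls
--     if "obstacle" in joined:
--         return "wall"
--     if "wall" in joined:
--         return "wall"
--     if "block" in joined or "blocker" in joined:
--         return "blocker"
--     if "goal_location_toilet_1" in joined or "toilet_1" in joined or "toilet1" in joined:
--         return "goal_a"
--     if "goal_location_toilet_2" in joined or "toilet_2" in joined or "toilet2" in joined:
--         return "goal_b"
--     if "goal_a" in joined or "desk_a" in joined or "toilet_a" in joined or "sink_a" in joined:
--         return "goal_a"
--     if "goal_b" in joined or "desk_b" in joined or "toilet_b" in joined or "sink_b" in joined: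
--         return "goal_b"
--     if "goal" in joined:
--         return "goal"
--     if "hazard" in joined:
--         return "hazard"
--     if "interactive" in joined or "button" in joined or "switch" in joined:
--         return "interactive"
--     if "floor" in joined or "ground" in joined or "tile" in joined:
--         return "floor"
--     if "hud" in joined or "panel" in joined or "ui" in joined:
--         return "hud"
--
--     return "decor"
-- ===== SOURCE B (Python) =====
-- # Single left-to-right scan with a 2-char-prefix bucket index (multi-pattern matching):
-- # collect the set of patterns occurring in the name, then return the first flat rule that matched.
-- _FLAT = [
--     ("character_1", "char_a"), ("char_a", "char_a"), ("worker_a", "char_a"),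
--     ("player_a", "char_a"), ("a_sprite", "char_a"),
--     ("character_2", "char_b"), ("char_b", "char_b"), ("worker_b", "char_b"),
--     ("player_b", "char_b"), ("b_sprite", "char_b"),
--     ("obstacle", "wall"), ("wall", "wall"),
--     ("block", "blocker"), ("blocker", "blocker"),
--     ("goal_location_toilet_1", "goal_a"), ("toilet_1", "goal_a"), ("toilet1", "goal_a"),
--     ("goal_location_toilet_2", "goal_b"), ("toilet_2", "goal_b"), ("toilet2", "goal_b"),
--     ("goal_a", "goal_a"), ("desk_a", "goal_a"), ("toilet_a", "goal_a"), ("sink_a", "goal_a"),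
--     ("goal_b", "goal_b"), ("desk_b", "goal_b"), ("toilet_b", "goal_b"), ("sink_b", "goal_b"),
--     ("goal", "goal"),
--     ("hazard", "hazard"),
--     ("interactive", "interactive"), ("button", "interactive"), ("switch", "interactive"),
--     ("floor", "floor"), ("ground", "floor"), ("tile", "floor"),
--     ("hud", "hud"), ("panel", "hud"), ("ui", "hud"),
-- ]
--
-- # index the patterns by their first two characters (every pattern has length >= 2)
-- _BUCKETS: dict = {}
-- for _pat, _ in _FLAT:
--     _BUCKETS.setdefault(_pat[:2], []).append(_pat)
--
-- def _norm(s: str) -> str: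
--     return s.lower().replace("-", "_").replace(" ", "_")
--
-- def _role_from_name(rel_parts: list[str], filename: str) -> str:
--     joined = "_".join(_norm(p) for p in rel_parts + [filename])
--     matched = set()
--     for i in range(len(joined) - 1):
--         for pat in _BUCKETS.get(joined[i:i + 2], ()):
--             if joined.startswith(pat, i):
--                 matched.add(pat)
--     for pat, role in _FLAT:
--         if pat in matched:
--             return role
--     return "decor"
-- ===== Notes on version B (the rewrite author's own statement) =====
-- stated objective: alternative
-- what changed: B replaces A's if/elif cascade of per-pattern 'in joined' scans with a single left-to-right scan of the normalized name using a 2-char-prefix bucket index to collect the set of matched patterns, then returns the first hit in a flat (pattern, role) list.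
import Mathlib
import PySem

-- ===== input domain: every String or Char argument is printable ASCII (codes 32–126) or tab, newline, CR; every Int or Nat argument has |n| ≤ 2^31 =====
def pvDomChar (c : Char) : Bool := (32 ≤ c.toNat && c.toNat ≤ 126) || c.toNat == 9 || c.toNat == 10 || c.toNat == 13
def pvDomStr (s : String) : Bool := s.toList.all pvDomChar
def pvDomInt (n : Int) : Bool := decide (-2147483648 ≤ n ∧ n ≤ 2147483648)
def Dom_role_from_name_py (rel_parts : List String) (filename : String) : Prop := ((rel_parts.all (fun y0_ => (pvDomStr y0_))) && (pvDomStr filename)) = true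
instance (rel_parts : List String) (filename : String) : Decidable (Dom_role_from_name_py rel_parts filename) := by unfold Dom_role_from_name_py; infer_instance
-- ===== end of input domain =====

-- B collects the set of matched patterns in one scan of the normalized name via a 2-char-prefix bucket index, then returns the first hit in a flat (pattern, role) list (alternative mechanism; same result).

-- ===== PORT A =====
-- _norm(s) = s.lower().replace("-", "_").replace(" ", "_")
def pvNorm (s : String) : String :=
  PySem.Str.replace (PySem.Str.replace (PySem.Str.lower s) "-" "_") " " "_"

def role_from_name_py (rel_parts : List String) (filename : String) : String :=
  let joined := PySem.Str.join "_" ((rel_parts ++ [filename]).map pvNorm)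
  if PySem.Str.isIn "character_1" joined || PySem.Str.isIn "char_a" joined ||
     PySem.Str.isIn "worker_a" joined || PySem.Str.isIn "player_a" joined ||
     PySem.Str.isIn "a_sprite" joined then "char_a"
  else if PySem.Str.isIn "character_2" joined || PySem.Str.isIn "char_b" joined ||
     PySem.Str.isIn "worker_b" joined || PySem.Str.isIn "player_b" joined ||
     PySem.Str.isIn "b_sprite" joined then "char_b"
  else if PySem.Str.isIn "obstacle" joined then "wall"
  else if PySem.Str.isIn "wall" joined then "wall"
  else if PySem.Str.isIn "block" joined || PySem.Str.isIn "blocker" joined then "blocker"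
  else if PySem.Str.isIn "goal_location_toilet_1" joined || PySem.Str.isIn "toilet_1" joined ||
     PySem.Str.isIn "toilet1" joined then "goal_a"
  else if PySem.Str.isIn "goal_location_toilet_2" joined || PySem.Str.isIn "toilet_2" joined ||
     PySem.Str.isIn "toilet2" joined then "goal_b"
  else if PySem.Str.isIn "goal_a" joined || PySem.Str.isIn "desk_a" joined ||
     PySem.Str.isIn "toilet_a" joined || PySem.Str.isIn "sink_a" joined then "goal_a"
  else if PySem.Str.isIn "goal_b" joined || PySem.Str.isIn "desk_b" joined ||
     PySem.Str.isIn "toilet_b" joined || PySem.Str.isIn "sink_b" joined then "goal_b"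
  else if PySem.Str.isIn "goal" joined then "goal"
  else if PySem.Str.isIn "hazard" joined then "hazard"
  else if PySem.Str.isIn "interactive" joined || PySem.Str.isIn "button" joined ||
     PySem.Str.isIn "switch" joined then "interactive"
  else if PySem.Str.isIn "floor" joined || PySem.Str.isIn "ground" joined ||
     PySem.Str.isIn "tile" joined then "floor"
  else if PySem.Str.isIn "hud" joined || PySem.Str.isIn "panel" joined ||
     PySem.Str.isIn "ui" joined then "hud"
  else "decor"

-- ===== PORT B =====
-- _FLAT from Source B: the flat ordered (pattern, role) list
def pvFlat : List (String × String) :=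
  [("character_1", "char_a"), ("char_a", "char_a"), ("worker_a", "char_a"),
   ("player_a", "char_a"), ("a_sprite", "char_a"),
   ("character_2", "char_b"), ("char_b", "char_b"), ("worker_b", "char_b"),
   ("player_b", "char_b"), ("b_sprite", "char_b"),
   ("obstacle", "wall"), ("wall", "wall"),
   ("block", "blocker"), ("blocker", "blocker"),
   ("goal_location_toilet_1", "goal_a"), ("toilet_1", "goal_a"), ("toilet1", "goal_a"),
   ("goal_location_toilet_2", "goal_b"), ("toilet_2", "goal_b"), ("toilet2", "goal_b"),
   ("goal_a", "goal_a"), ("desk_a", "goal_a"), ("toilet_a", "goal_a"), ("sink_a", "goal_a"),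
   ("goal_b", "goal_b"), ("desk_b", "goal_b"), ("toilet_b", "goal_b"), ("sink_b", "goal_b"),
   ("goal", "goal"),
   ("hazard", "hazard"),
   ("interactive", "interactive"), ("button", "interactive"), ("switch", "interactive"),
   ("floor", "floor"), ("ground", "floor"), ("tile", "floor"),
   ("hud", "hud"), ("panel", "hud"), ("ui", "hud")]

-- the module-level loop: _BUCKETS.setdefault(pat[:2], []).append(pat)
def pvBuckets : PySem.Dict String (List String) :=
  pvFlat.foldl (fun d pr =>
    PySem.Dict.insert d (PySem.Str.slice pr.1 none (some 2))
      (PySem.Dict.getD d (PySem.Str.slice pr.1 none (some 2)) [] ++ [pr.1]))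
    PySem.Dict.empty

-- joined.startswith(pat, i): exact for 0 ≤ i (the loop's i comes from range, hence i ≥ 0);
-- Python compares pat with the text starting at offset i, i.e. with joined[i:] here
def pvStartswithFrom (s pat : String) (i : Int) : Bool :=
  PySem.Chars.startswith (s.toList.drop i.toNat) pat.toList

-- the scan: for i in range(len(joined)-1): for pat in _BUCKETS.get(joined[i:i+2], ()): ...
def pvMatched (joined : String) : PySem.Set String :=
  (PySem.List.pyRange 0 (PySem.Str.len joined - 1) 1).foldl (fun acc i =>
    (PySem.Dict.getD pvBuckets (PySem.Str.slice joined (some i) (some (i + 2))) []).foldl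
      (fun a pat => if pvStartswithFrom joined pat i then PySem.Set.add a pat else a) acc)
    PySem.Set.empty

-- the 'for pat, role in _FLAT' loop of Source B
def pvFindRole (matched : PySem.Set String) : List (String × String) → String
  | [] => "decor"
  | (pat, role) :: rest =>
      if PySem.Set.contains matched pat then role else pvFindRole matched rest

def role_from_name_py_alt (rel_parts : List String) (filename : String) : String :=
  let joined := PySem.Str.join "_" ((rel_parts ++ [filename]).map pvNorm)
  pvFindRole (pvMatched joined) pvFlat

-- ===== PRECONDITION & SPEC =====
def Spec_role_from_name_py (rel_parts : List String) (filename : String) (out : String) : Prop := out = role_from_name_py_alt rel_parts filename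
instance (rel_parts : List String) (filename : String) (out : String) : Decidable (Spec_role_from_name_py rel_parts filename out) := by unfold Spec_role_from_name_py; infer_instance

-- ===== CLAIM (what is proved, stated in full; the proofs are below) =====
def Claim_equal_role_from_name_py : Prop := ∀ (rel_parts : List String) (filename : String), Dom_role_from_name_py rel_parts filename → Spec_role_from_name_py rel_parts filename (role_from_name_py rel_parts filename)

-- ===== LEMMAS AND PROOFS =====

-- membership in the inner conditional-add fold
lemma pv_mem_foldl_addIf (x : String) (c : String → Bool) (l : List String) (acc : PySem.Set String) :
    x ∈ l.foldl (fun a pat => if c pat then PySem.Set.add a pat else a) acc ↔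
      x ∈ acc ∨ (x ∈ l ∧ c x = true) := by
  induction l generalizing acc with
  | nil => simp
  | cons y l ih =>
      simp only [List.foldl_cons, List.mem_cons]
      by_cases hc : c y = true
      · rw [if_pos hc, ih]
        simp only [PySem.Set.mem_add]
        constructor
        · rintro (⟨h | rfl⟩ | ⟨hm, hcx⟩)
          · exact Or.inl h
          · exact Or.inr ⟨Or.inl rfl, hc⟩
          · exact Or.inr ⟨Or.inr hm, hcx⟩
        · rintro (h | ⟨rfl | hm, hcx⟩)
          · exact Or.inl (Or.inl h)
          · exact Or.inl (Or.inr rfl)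
          · exact Or.inr ⟨hm, hcx⟩
      · rw [if_neg hc, ih]
        constructor
        · rintro (h | ⟨hm, hcx⟩)
          · exact Or.inl h
          · exact Or.inr ⟨Or.inr hm, hcx⟩
        · rintro (h | ⟨rfl | hm, hcx⟩)
          · exact Or.inl h
          · exact absurd hcx hc
          · exact Or.inr ⟨hm, hcx⟩

-- membership in the outer scan fold
lemma pv_mem_foldl_scan (x : String) (bucket : Int → List String) (c : Int → String → Bool)
    (ls : List Int) (acc : PySem.Set String) :
    x ∈ ls.foldl (fun a i =>
        (bucket i).foldl (fun a' pat => if c i pat then PySem.Set.add a' pat else a') a) acc ↔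
      x ∈ acc ∨ ∃ i ∈ ls, x ∈ bucket i ∧ c i x = true := by
  induction ls generalizing acc with
  | nil => simp
  | cons i ls ih =>
      simp only [List.foldl_cons, ih, pv_mem_foldl_addIf, List.mem_cons]
      constructor
      · rintro (⟨h | ⟨hm, hcx⟩⟩ | ⟨M, hM, hb, hcM⟩)
        · exact Or.inl h
        · exact Or.inr ⟨i, Or.inl rfl, hm, hcx⟩
        · exact Or.inr ⟨M, Or.inr hM, hb, hcM⟩
      · rintro (h | ⟨M, rfl | hM, hb, hcM⟩)
        · exact Or.inl (Or.inl h)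
        · exact Or.inl (Or.inr ⟨hb, hcM⟩)
        · exact Or.inr ⟨M, hM, hb, hcM⟩

-- a pattern of length ≥ 2 that sits in its own bucket is in the matched set iff it occurs in joined
lemma pv_mem_matched_iff (joined p : String) (h2 : 2 ≤ p.toList.length)
    (hB : p ∈ PySem.Dict.getD pvBuckets (PySem.Str.slice p none (some 2)) []) :
    PySem.Set.contains (pvMatched joined) p = PySem.Str.isIn p joined := by
  rw [Bool.eq_iff_iff, PySem.Set.contains_iff, PySem.Str.isIn_iff_infix]
  unfold pvMatched
  rw [pv_mem_foldl_scan p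
    (fun i => PySem.Dict.getD pvBuckets (PySem.Str.slice joined (some i) (some (i + 2))) [])
    (fun i pat => pvStartswithFrom joined pat i)]
  simp only [PySem.Set.empty, List.not_mem_nil, false_or, PySem.List.mem_pyRange_one,
    PySem.Str.len_eq]
  constructor
  · rintro ⟨i, ⟨hi0, hilen⟩, _, hsw⟩
    unfold pvStartswithFrom at hsw
    exact ((PySem.Chars.startswith_iff _ _).mp hsw).isInfix.trans
      (joined.toList.drop_suffix i.toNat).isInfix
  · intro h
    obtain ⟨s, t, hst⟩ := h
    have hL : joined.toList.length = s.length + p.toList.length + t.length := by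
      rw [← hst]; simp; omega
    have hdrop : joined.toList.drop s.length = p.toList ++ t := by
      rw [← hst, show s ++ p.toList ++ t = s ++ (p.toList ++ t) by simp, List.drop_left]
    refine ⟨(s.length : Int), ⟨by positivity, by omega⟩, ?_, ?_⟩
    · have hslice : PySem.Str.slice joined (some (s.length : Int)) (some ((s.length : Int) + 2))
          = PySem.Str.slice p none (some 2) := by
        apply String.toList_inj.mp
        simp only [PySem.Str.toList_slice, PySem.Chars.slice_eq_listSlice]
        rw [show ((s.length : Int) + 2) = ((s.length : Int) + ((2 : Nat) : Int)) by norm_num]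
        rw [PySem.List.slice_natCast_add, PySem.List.slice_to _ (by norm_num)]
        rw [hdrop, List.take_append]
        have h2' : (2 : Nat) ≤ p.length := by simpa using h2
        simp [show (2 : Int).toNat = 2 from rfl]
        exact Or.inl (by omega)
      rw [hslice]
      exact hB
    · unfold pvStartswithFrom
      apply (PySem.Chars.startswith_iff _ _).mpr
      rw [Int.toNat_natCast, hdrop]
      exact ⟨t, rfl⟩

-- the chain of isIn tests the set-membership loop is equivalent to
def pvChainIsIn (joined : String) : List (String × String) → String
  | [] => "decor"
  | (pat, role) :: rest =>
      if PySem.Str.isIn pat joined then role else pvChainIsIn joined rest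

lemma pv_findRole_eq (joined : String) (l : List (String × String))
    (h : ∀ pr ∈ l, 2 ≤ pr.1.toList.length ∧
      pr.1 ∈ PySem.Dict.getD pvBuckets (PySem.Str.slice pr.1 none (some 2)) []) :
    pvFindRole (pvMatched joined) l = pvChainIsIn joined l := by
  induction l with
  | nil => rfl
  | cons pr rest ih =>
      obtain ⟨pat, role⟩ := pr
      have hp := h _ (List.mem_cons_self)
      simp only [pvFindRole, pvChainIsIn,
        pv_mem_matched_iff joined pat hp.1 hp.2,
        ih (fun q hq => h q (List.mem_cons_of_mem _ hq))]

lemma pv_if_or (a b : Bool) (x y : String) :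
    (if (a || b) then x else y) = if a then x else if b then x else y := by
  cases a <;> simp

-- ===== VERDICT (by name: the statement is the Claim_ definition above) =====
set_option maxRecDepth 8192 in
theorem role_from_name_py_spec : Claim_equal_role_from_name_py := by
  intro rel_parts filename _
  unfold Spec_role_from_name_py role_from_name_py role_from_name_py_alt
  rw [pv_findRole_eq _ _ (by decide)]
  simp only [pvFlat, pvChainIsIn, pv_if_or]
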